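-- pv_equiv track=rewrite | github.com/FrancescoLazzarotto/Tictactoe-game | TicTacToe Game.py | get_segmenti_contigui
-- ===== SOURCE A (Python) =====
-- def get_segmenti_contigui(linea, simbolo):
--     """
--     data una linea e un simbolo, restituisce una lista con le lunghezze
--     delle sequenze continue del simbolo in quella linea
--     -esamina ogni cella della linea fornita e conta le sequenze del simbolo passato
--     -quando trova simboli uguali, conta la sequenza e la memorizza nella lista segmenti
--     """
--     segmenti = []
--     count = 0
--     for cella in linea:
--         if cella == simbolo:
--             count += 1
--         else:
--             if count > 0:
--                 segmenti.append(count)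
--                 count = 0
--     if count > 0:
--         segmenti.append(count)
--     return segmenti
-- ===== SOURCE B (Python) =====
-- from itertools import groupby
--
-- def get_segmenti_contigui(linea, simbolo):
--     return [sum(1 for _ in g) for k, g in groupby(linea) if k == simbolo]
-- ===== Notes on version B (the rewrite author's own statement) =====
-- stated objective: idiomatic
-- what changed: Replaces the explicit counter-with-end-of-loop-flush accumulation by itertools.groupby: group consecutive equal cells into runs, keep the runs whose key is simbolo, emit their lengths.
import Mathlib
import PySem

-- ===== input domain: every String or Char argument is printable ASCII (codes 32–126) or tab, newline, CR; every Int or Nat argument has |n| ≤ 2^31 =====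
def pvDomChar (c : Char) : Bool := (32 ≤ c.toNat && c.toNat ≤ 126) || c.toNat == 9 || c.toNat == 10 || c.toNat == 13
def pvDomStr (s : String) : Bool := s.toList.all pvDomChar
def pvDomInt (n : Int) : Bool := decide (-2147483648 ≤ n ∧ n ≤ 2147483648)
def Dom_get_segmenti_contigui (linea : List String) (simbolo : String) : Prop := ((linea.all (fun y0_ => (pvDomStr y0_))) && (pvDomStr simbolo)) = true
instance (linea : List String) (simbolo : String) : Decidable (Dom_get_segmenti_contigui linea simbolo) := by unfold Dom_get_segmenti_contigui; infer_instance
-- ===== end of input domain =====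

-- B replaces A's counter-with-final-flush loop by grouping consecutive equal cells
-- into runs (itertools.groupby) and emitting the lengths of the runs keyed simbolo.

-- ===== PORT A =====
-- A's loop: state (segmenti, count); the trailing 'if count > 0' flush becomes the [] case.
def pvGoA : List String → List Int → Int → String → List Int
  | [], segmenti, count, _ => if count > 0 then segmenti ++ [count] else segmenti
  | cella :: rest, segmenti, count, simbolo =>
      if cella = simbolo then pvGoA rest segmenti (count + 1) simbolo
      else pvGoA rest (if count > 0 then segmenti ++ [count] else segmenti) 0 simbolo

def get_segmenti_contigui (linea : List String) (simbolo : String) : List Int :=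
  pvGoA linea [] 0 simbolo

-- ===== PORT B =====
-- groupby(linea): consecutive runs as (key, length) pairs.
def pvRuns (linea : List String) : List (String × Nat) :=
  match linea with
  | [] => []
  | c :: rest =>
      match pvRuns rest with
      | [] => [(c, 1)]
      | (k, n) :: t => if c = k then (k, n + 1) :: t else (c, 1) :: (k, n) :: t

def get_segmenti_contigui_alt (linea : List String) (simbolo : String) : List Int :=
  ((pvRuns linea).filter (fun p => p.1 = simbolo)).map (fun p => (p.2 : Int))

-- ===== PRECONDITION & SPEC =====
def Spec_get_segmenti_contigui (linea : List String) (simbolo : String) (out : List Int) : Prop := out = get_segmenti_contigui_alt linea simbolo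
instance (linea : List String) (simbolo : String) (out : List Int) : Decidable (Spec_get_segmenti_contigui linea simbolo out) := by unfold Spec_get_segmenti_contigui; infer_instance

-- ===== CLAIM (what is proved, stated in full; the proofs are below) =====
def Claim_equal_get_segmenti_contigui : Prop := ∀ (linea : List String) (simbolo : String), Dom_get_segmenti_contigui linea simbolo → Spec_get_segmenti_contigui linea simbolo (get_segmenti_contigui linea simbolo)

-- ===== LEMMAS AND PROOFS =====

-- filtered-and-mapped runs, a shorthand for the proofs
def pvFM (rs : List (String × Nat)) (s : String) : List Int :=
  (rs.filter (fun p => p.1 = s)).map (fun p => (p.2 : Int))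

-- what pvGoA returns given a pending count, expressed on the run list
def pvA2 (count : Int) (rs : List (String × Nat)) (s : String) : List Int :=
  match rs with
  | [] => if count > 0 then [count] else []
  | (k, n) :: t =>
      if k = s then (count + (n : Int)) :: pvFM t s
      else if count > 0 then count :: pvFM t s else pvFM t s

theorem pvGoA_append (linea : List String) (seg : List Int) (count : Int) (s : String) :
    pvGoA linea seg count s = seg ++ pvGoA linea [] count s := by
  induction linea generalizing seg count with
  | nil => simp only [pvGoA]; split <;> simp
  | cons c rest ih =>
      simp only [pvGoA]
      split
      · exact ih seg (count + 1)
      · rw [ih, ih (if count > 0 then [] ++ [count] else []) 0]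
        split <;> simp

theorem pvRuns_cons (c : String) (rest : List String) :
    pvRuns (c :: rest) = match pvRuns rest with
      | [] => [(c, 1)]
      | (k, n) :: t => if c = k then (k, n + 1) :: t else (c, 1) :: (k, n) :: t := rfl

theorem pvRuns_ne_nil (c : String) (rest : List String) : pvRuns (c :: rest) ≠ [] := by
  rcases h : pvRuns rest with _ | ⟨⟨k, n⟩, t⟩
  · simp [pvRuns_cons, h]
  · simp only [pvRuns_cons, h]
    split <;> simp

theorem pvGoA_eq_pvA2 (linea : List String) (count : Int) (s : String) (h : 0 ≤ count) :
    pvGoA linea [] count s = pvA2 count (pvRuns linea) s := by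
  induction linea generalizing count with
  | nil => simp [pvGoA, pvRuns, pvA2]
  | cons c rest ih =>
      have hcons := pvRuns_cons c rest
      rcases hr : pvRuns rest with _ | ⟨⟨k, n⟩, t⟩ <;> rw [hr] at hcons <;> simp only [] at hcons
      · have hrest : rest = [] := by
          cases rest with
          | nil => rfl
          | cons x xs => exact absurd hr (pvRuns_ne_nil x xs)
        subst hrest
        rw [hcons]
        by_cases hc : c = s
        · simp [pvGoA, pvA2, pvFM, hc, h]
        · simp only [pvGoA, if_neg hc]
          by_cases hp : count > 0 <;> simp [pvA2, pvFM, hc, hp]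
      · rw [hcons]
        by_cases hc : c = s
        · simp only [pvGoA, if_pos hc]
          rw [ih (count + 1) (by omega), hr]
          by_cases hck : c = k
          · rw [if_pos hck]
            have hks : k = s := hck.symm.trans hc
            simp only [pvA2, if_pos hks]
            congr 1
            push_cast
            ring
          · rw [if_neg hck]
            have hks : ¬ k = s := fun hk => hck (hc.trans hk.symm)
            simp only [pvA2, if_pos hc, if_neg hks, pvFM]
            have : count + 1 > 0 := by omega
            rw [if_pos this]
            simp [List.filter, hks]
        · simp only [pvGoA, if_neg hc]
          rw [pvGoA_append, ih 0 (by omega), hr]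
          by_cases hck : c = k
          · rw [if_pos hck]
            have hks : ¬ k = s := fun hk => hc (hck.trans hk)
            simp only [pvA2, if_neg hks]
            simp [pvFM]
            split <;> simp
          · rw [if_neg hck]
            simp only [pvA2, if_neg hc]
            by_cases hks : k = s
            · simp only [pvFM, List.filter, hks]
              simp
              split <;> simp
            · simp only [pvFM, List.filter, hks]
              simp [hks]
              split <;> simp

theorem pvA2_zero (rs : List (String × Nat)) (s : String) : pvA2 0 rs s = pvFM rs s := by
  match rs with
  | [] => simp [pvA2, pvFM]
  | (k, n) :: t =>
      simp only [pvA2, pvFM, List.filter]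
      by_cases hks : k = s <;> simp [hks]

-- ===== VERDICT (by name: the statement is the Claim_ definition above) =====
theorem get_segmenti_contigui_spec : Claim_equal_get_segmenti_contigui := by
  intro linea simbolo _
  show get_segmenti_contigui linea simbolo = get_segmenti_contigui_alt linea simbolo
  rw [get_segmenti_contigui, pvGoA_eq_pvA2 linea 0 simbolo le_rfl, pvA2_zero]
  rfl
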